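-- pv_equiv track=rewrite | github.com/ChowdaryDinesh/DevOps | python/01_find_index.py | find_index_sum
-- ===== SOURCE A (Python) =====
-- def prime_numbers(n: int):
--     """Function to find the prime numbers below N"""
--     prime = list()
--     prime.append(2)
--     for i in range(2, n+1):
--         for j in range(2, i):
--             if i % j == 0:
--                 break
--             elif j == i-1:
--                 prime.append(i)
--     return prime
--
-- def find_index_sum(n: int, s: int):
--     """Function to find the index when sum is greater than S"""
--     prime = prime_numbers(n)
--     sum = 0
--     i = 0
--     list_length = len(prime)
--     while True:
--         sum += prime[i]
--         if sum > s:
--             return i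
--         i += 1
--         i = i % list_length
-- ===== SOURCE B (Python) =====
-- def _is_prime(i):
--     j = 2
--     while j * j <= i:
--         if i % j == 0:
--             return False
--         j += 1
--     return True
--
-- def _first_exceed(prefix, r):
--     for idx, c in enumerate(prefix):
--         if c > r:
--             return idx
--     return 0
--
-- def find_index_sum(n: int, s: int):
--     primes = [2] + [i for i in range(3, n + 1) if _is_prime(i)]
--     prefix = []
--     t = 0
--     for p in primes:
--         t += p
--         prefix.append(t)
--     if s < 0:
--         return 0
--     r = s % t
--     return _first_exceed(prefix, r)
-- ===== Notes on version B (the rewrite author's own statement) =====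
-- stated objective: faster
-- what changed: B replaces A's unbounded cyclic while-loop (one iteration per cyclic prime visited until the running sum exceeds s) by prefix sums over one cycle plus modulo arithmetic on the cycle total followed by a single linear scan, and replaces A's O(i) trial division per candidate by sqrt-bounded trial division.
import Mathlib
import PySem

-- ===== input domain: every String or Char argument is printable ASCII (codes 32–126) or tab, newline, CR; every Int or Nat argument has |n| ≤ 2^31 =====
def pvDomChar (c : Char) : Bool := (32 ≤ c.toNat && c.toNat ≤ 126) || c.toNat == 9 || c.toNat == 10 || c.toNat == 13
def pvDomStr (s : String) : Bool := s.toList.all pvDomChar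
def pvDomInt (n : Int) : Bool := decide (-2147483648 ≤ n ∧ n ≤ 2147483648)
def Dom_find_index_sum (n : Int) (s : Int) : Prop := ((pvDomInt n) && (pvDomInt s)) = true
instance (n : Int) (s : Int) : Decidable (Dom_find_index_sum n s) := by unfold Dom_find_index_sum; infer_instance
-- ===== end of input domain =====

-- B replaces A's unbounded cyclic accumulation loop by prefix sums plus floor-division/modulo
-- arithmetic over the cycle total (and sqrt-bounded trial division for the primes): same return
-- value, computed without iterating the cycles.

-- ===== PORT A =====
-- inner loop of prime_numbers: 'for j in range(2, i): if i % j == 0: break; elif j == i-1: prime.append(i)'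
def pvInnerA (i : Int) : List Int → List Int → List Int
  | [], acc => acc
  | j :: js, acc =>
    if PySem.Int.mod i j = 0 then acc
    else if j = i - 1 then pvInnerA i js (acc ++ [i])
    else pvInnerA i js acc

def prime_numbers (n : Int) : List Int :=
  (PySem.List.pyRange 2 (n + 1) 1).foldl
    (fun acc i => pvInnerA i (PySem.List.pyRange 2 i 1) acc) [2]

-- 'while True: sum += prime[i]; if sum > s: return i; i += 1; i %= list_length'
-- the 'none' and '¬ 1 ≤ v' branches return junk 0: they are unreachable for the lists A builds
-- (0 ≤ i < len, every element ≥ 2); the '1 ≤ v' test only makes the recursion total.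
def pvLoopA (P : List Int) (s : Int) (sum : Int) (i : Int) : Int :=
  match PySem.List.pyGet? P i with
  | none => 0
  | some v =>
    if s < sum + v then i
    else if h : 1 ≤ v then pvLoopA P s (sum + v) (PySem.Int.mod (i + 1) (PySem.List.len P))
    else 0
termination_by (s + 1 - sum).toNat
decreasing_by omega

def find_index_sum (n : Int) (s : Int) : Int :=
  pvLoopA (prime_numbers n) s 0 0

-- ===== PORT B =====
-- 'j = 2; while j*j <= i: if i % j == 0: return False; j += 1; return True'  (j stays ≥ 0: Nat)
def pvIsPrimeB (i : Int) (j : Nat) : Bool :=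
  if (j : Int) * (j : Int) ≤ i then
    if PySem.Int.mod i (j : Int) = 0 then false else pvIsPrimeB i (j + 1)
  else true
termination_by (i + 1 - (j : Int)).toNat
decreasing_by
  have hj : (j : Int) ≤ i := by nlinarith [Int.natCast_nonneg j]
  omega

-- 'for idx, c in enumerate(prefix): if c > r: return idx; return 0'
def pvFirstExceedGo (r : Int) : List (Int × Int) → Int
  | [] => 0
  | (idx, c) :: rest => if r < c then idx else pvFirstExceedGo r rest

def pvFirstExceed (pre : List Int) (r : Int) : Int :=
  pvFirstExceedGo r (PySem.List.enumerate pre 0)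

def find_index_sum_alt (n : Int) (s : Int) : Int :=
  let primes := 2 :: (PySem.List.pyRange 3 (n + 1) 1).filter (fun i => pvIsPrimeB i 2)
  let tp := primes.foldl (fun (tp : Int × List Int) p => (tp.1 + p, tp.2 ++ [tp.1 + p])) (0, [])
  if s < 0 then 0
  else pvFirstExceed tp.2 (PySem.Int.mod s tp.1)

-- ===== PRECONDITION & SPEC =====
def Spec_find_index_sum (n : Int) (s : Int) (out : Int) : Prop := out = find_index_sum_alt n s
instance (n : Int) (s : Int) (out : Int) : Decidable (Spec_find_index_sum n s out) := by unfold Spec_find_index_sum; infer_instance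

-- ===== CLAIM (what is proved, stated in full; the proofs are below) =====
def Claim_equal_find_index_sum : Prop := ∀ (n : Int) (s : Int), Dom_find_index_sum n s → Spec_find_index_sum n s (find_index_sum n s)

-- ===== LEMMAS AND PROOFS =====

-- partial sum of the first k elements
def pvS (P : List Int) (k : Nat) : Int := (P.take k).sum

-- the prefix list B's fold builds
def pvPreSpec (t0 : Int) : List Int → List Int
  | [] => []
  | p :: P => (t0 + p) :: pvPreSpec (t0 + p) P

lemma pvPreFold (P : List Int) : ∀ (t0 : Int) (acc : List Int),
    P.foldl (fun (tp : Int × List Int) p => (tp.1 + p, tp.2 ++ [tp.1 + p])) (t0, acc)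
      = (t0 + P.sum, acc ++ pvPreSpec t0 P) := by
  induction P with
  | nil => simp [pvPreSpec]
  | cons p P ih => intro t0 acc; simp [pvPreSpec, ih, add_assoc]

lemma pvPreSpec_length (t0 : Int) (P : List Int) : (pvPreSpec t0 P).length = P.length := by
  induction P generalizing t0 with
  | nil => rfl
  | cons p P ih => simp [pvPreSpec, ih]

lemma pvPreSpec_getElem (P : List Int) : ∀ (t0 : Int) (k : Nat) (hk : k < P.length),
    (pvPreSpec t0 P)[k]'(by rw [pvPreSpec_length]; exact hk) = t0 + pvS P (k + 1) := by
  induction P with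
  | nil => intro t0 k hk; simp at hk
  | cons p P ih =>
    intro t0 k hk
    cases k with
    | zero => simp [pvPreSpec, pvS]
    | succ k =>
      simp only [pvPreSpec, List.getElem_cons_succ]
      rw [ih (t0 + p) k (by simpa using hk)]
      simp [pvS, add_assoc]

lemma pvS_succ (P : List Int) (k : Nat) (hk : k < P.length) :
    pvS P (k + 1) = pvS P k + P[k] := List.sum_take_succ P k hk

lemma pvS_le_sum (P : List Int) (hP : ∀ x ∈ P, 2 ≤ x) (k : Nat) :
    pvS P k ≤ P.sum := by
  have h1 : P.sum = (P.take k).sum + (P.drop k).sum := by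
    rw [← List.sum_append, List.take_append_drop]
  have h2 : 0 ≤ (P.drop k).sum :=
    List.sum_nonneg (fun x hx => by have := hP x (List.mem_of_mem_drop hx); omega)
  simp [pvS]; omega

lemma pvS_length (P : List Int) : pvS P P.length = P.sum := by
  simp [pvS]

lemma pvSum_nonneg (P : List Int) (hP : ∀ x ∈ P, 2 ≤ x) : 0 ≤ P.sum :=
  List.sum_nonneg (fun x hx => by have := hP x hx; omega)

-- inner-loop characterisation: for 3 ≤ i the append happens iff no j in [a, i) divides i
lemma pvInnerA_eq (i : Int) (_hi : 3 ≤ i) : ∀ (m : Nat) (a : Int) (acc : List Int),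
    2 ≤ a → a ≤ i - 1 → (i - 1 - a).toNat ≤ m →
    pvInnerA i (PySem.List.pyRange a i 1) acc
      = if ∀ j ∈ PySem.List.pyRange a i 1, PySem.Int.mod i j ≠ 0 then acc ++ [i] else acc := by
  intro m
  induction m with
  | zero =>
    intro a acc ha2 hai hm
    have ha : a = i - 1 := by omega
    subst ha
    rw [PySem.List.pyRange_one_cons (by omega), PySem.List.pyRange_one_eq_nil (by omega)]
    by_cases hd : PySem.Int.mod i (i - 1) = 0
    · simp [pvInnerA, hd]
    · simp [pvInnerA, hd]
  | succ m ih =>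
    intro a acc ha2 hai hm
    rw [PySem.List.pyRange_one_cons (by omega)]
    by_cases hd : PySem.Int.mod i a = 0
    · simp [pvInnerA, hd]
    · by_cases hlast : a = i - 1
      · subst hlast
        rw [PySem.List.pyRange_one_eq_nil (by omega)]
        simp [pvInnerA, hd]
      · have h1 : a + 1 ≤ i - 1 := by omega
        simp only [pvInnerA, if_neg hd, if_neg hlast]
        rw [ih (a + 1) acc (by omega) h1 (by omega)]
        by_cases hrest : ∀ j ∈ PySem.List.pyRange (a + 1) i 1, PySem.Int.mod i j ≠ 0
        · rw [if_pos hrest, if_pos]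
          intro j hj
          rw [List.mem_cons] at hj
          rcases hj with rfl | hj
          · exact hd
          · exact hrest j hj
        · rw [if_neg hrest, if_neg]
          intro hall
          exact hrest fun j hj => hall j (List.mem_cons.mpr (Or.inr hj))

-- B's sqrt-bounded test, characterised
lemma pvIsPrimeB_eq (i : Int) : ∀ (m : Nat) (j0 : Nat), (i + 1 - (j0 : Int)).toNat ≤ m →
    (pvIsPrimeB i j0 = true ↔
      ∀ j : Nat, j0 ≤ j → (j : Int) * (j : Int) ≤ i → PySem.Int.mod i (j : Int) ≠ 0) := by
  intro m
  induction m with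
  | zero =>
    intro j0 hm
    have hout : ¬ ((j0 : Int) * (j0 : Int) ≤ i) := by
      intro hle
      have hj : (j0 : Int) ≤ i := by nlinarith [Int.natCast_nonneg j0]
      omega
    rw [pvIsPrimeB, if_neg hout]
    simp only [true_iff]
    intro j hj hsq
    exfalso
    have : (j0 : Int) ≤ (j : Int) := by exact_mod_cast hj
    nlinarith [Int.natCast_nonneg j0]
  | succ m ih =>
    intro j0 hm
    by_cases hout : (j0 : Int) * (j0 : Int) ≤ i
    · rw [pvIsPrimeB, if_pos hout]
      by_cases hd : PySem.Int.mod i (j0 : Int) = 0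
      · rw [if_pos hd]
        simp only [Bool.false_eq_true, false_iff]
        intro hall
        exact hall j0 le_rfl hout hd
      · rw [if_neg hd]
        have hj0i : (j0 : Int) ≤ i := by nlinarith [Int.natCast_nonneg j0]
        rw [ih (j0 + 1) (by push_cast; omega)]
        constructor
        · intro h j hj hsq
          rcases Nat.eq_or_lt_of_le hj with rfl | hlt
          · exact hd
          · exact h j hlt hsq
        · intro h j hj hsq
          exact h j (by omega) hsq
    · rw [pvIsPrimeB, if_neg hout]
      simp only [true_iff]
      intro j hj hsq
      exfalso
      have : (j0 : Int) ≤ (j : Int) := by exact_mod_cast hj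
      nlinarith [Int.natCast_nonneg j0]

-- trial division over [2, i) agrees with sqrt-bounded trial division
lemma pvCond_iff (i : Int) (hi : 3 ≤ i) :
    (∀ j ∈ PySem.List.pyRange 2 i 1, PySem.Int.mod i j ≠ 0) ↔ pvIsPrimeB i 2 = true := by
  rw [pvIsPrimeB_eq i (i + 1 - 2).toNat 2 (by push_cast; omega)]
  constructor
  · intro h j hj hsq
    have hj2 : (2 : Int) ≤ (j : Int) := by exact_mod_cast hj
    have hji : (j : Int) < i := by nlinarith
    exact h j (PySem.List.mem_pyRange_one.mpr ⟨hj2, hji⟩)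
  · intro h j hj
    rw [PySem.List.mem_pyRange_one] at hj
    obtain ⟨hj2, hji⟩ := hj
    intro hd
    rw [PySem.Int.mod_eq_zero_iff_dvd] at hd
    obtain ⟨k, hk⟩ := hd
    have hjpos : 0 < j := by omega
    have hkpos : 0 < k := by nlinarith
    have hk2 : 2 ≤ k := by
      rcases Int.lt_or_le k 2 with h1 | h1
      · interval_cases k
        · omega
      · exact h1
    by_cases hjk : j ≤ k
    · have hsq : (j.toNat : Int) * (j.toNat : Int) ≤ i := by
        rw [Int.toNat_of_nonneg (by omega)]
        nlinarith
      have := h j.toNat (by omega) hsq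
      rw [Int.toNat_of_nonneg (by omega)] at this
      exact this (by rw [PySem.Int.mod_eq_zero_iff_dvd]; exact ⟨k, hk⟩)
    · have hsq : (k.toNat : Int) * (k.toNat : Int) ≤ i := by
        rw [Int.toNat_of_nonneg (by omega)]
        nlinarith
      have := h k.toNat (by omega) hsq
      rw [Int.toNat_of_nonneg (by omega)] at this
      exact this (by rw [PySem.Int.mod_eq_zero_iff_dvd]; exact ⟨j, by linarith [hk]⟩)

-- the two prime lists coincide
lemma pvPrimes_eq (n : Int) :
    prime_numbers n = 2 :: (PySem.List.pyRange 3 (n + 1) 1).filter (fun i => pvIsPrimeB i 2) := by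
  unfold prime_numbers
  by_cases hn : n + 1 ≤ 2
  · rw [PySem.List.pyRange_one_eq_nil hn, PySem.List.pyRange_one_eq_nil (by omega)]
    rfl
  · rw [PySem.List.pyRange_one_cons (by omega : (2:Int) < n + 1)]
    simp only [List.foldl_cons]
    rw [show pvInnerA 2 (PySem.List.pyRange 2 2 1) [2] = [2] by
      rw [PySem.List.pyRange_one_eq_nil le_rfl]; rfl]
    rw [PySem.List.foldl_congr_mem _ _
      (fun acc i => if ∀ j ∈ PySem.List.pyRange 2 i 1, PySem.Int.mod i j ≠ 0 then acc ++ [i] else acc) _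
      (fun acc i hi => by
        have h3 : 3 ≤ i := (PySem.List.mem_pyRange_one.mp hi).1
        exact pvInnerA_eq i h3 (i - 3).toNat 2 acc le_rfl (by omega) (by omega))]
    rw [PySem.List.foldl_append_ite_eq_filter, List.singleton_append,
      show (2:Int) + 1 = 3 by norm_num]
    congr 1
    apply List.filter_congr
    intro i hi
    have h3 : 3 ≤ i := (PySem.List.mem_pyRange_one.mp hi).1
    rw [Bool.eq_iff_iff]
    simp only [decide_eq_true_eq]
    exact pvCond_iff i h3

-- full-cycle ramp: while a whole further cycle still fits under s, the loop crosses it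
lemma pvLoopA_cycle (P : List Int) (s q r : Int) (hP : ∀ x ∈ P, 2 ≤ x)
    (hs : s = q * P.sum + r) (hr : 0 ≤ r) :
    ∀ (m j : Nat), j < P.length → P.length - j ≤ m → ∀ (q' : Int), q' + 1 ≤ q →
      pvLoopA P s (q' * P.sum + pvS P j) (j : Int) = pvLoopA P s ((q' + 1) * P.sum) 0 := by
  intro m
  induction m with
  | zero => intro j hj hm; omega
  | succ m ih =>
    intro j hj hm q' hq'
    have hget : PySem.List.pyGet? P (j : Int) = some P[j] := by
      rw [PySem.List.pyGet?_natCast]; exact List.getElem?_eq_getElem hj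
    have hv2 : 2 ≤ P[j] := hP _ (List.getElem_mem hj)
    have hsum' : q' * P.sum + pvS P j + P[j] = q' * P.sum + pvS P (j + 1) := by
      rw [pvS_succ P j hj]; ring
    have hT0 : 0 ≤ P.sum := pvSum_nonneg P hP
    have hle : q' * P.sum + pvS P (j + 1) ≤ s := by
      have h1 : pvS P (j + 1) ≤ P.sum := pvS_le_sum P hP (j + 1)
      have h2 : (q' + 1) * P.sum ≤ q * P.sum :=
        mul_le_mul_of_nonneg_right (by omega) hT0
      nlinarith
    rw [pvLoopA, hget]
    simp only [hsum']
    rw [if_neg (by omega), dif_pos (by omega)]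
    rcases Nat.lt_or_ge (j + 1) P.length with hlt | hge
    · have hmod : PySem.Int.mod ((j : Int) + 1) (PySem.List.len P) = ((j + 1 : Nat) : Int) := by
        rw [PySem.List.len_eq, PySem.Int.mod_eq_emod_of_pos (by exact_mod_cast Nat.pos_of_ne_zero (by omega))]
        rw [Int.emod_eq_of_lt (by omega) (by exact_mod_cast hlt)]
        push_cast; ring
      rw [hmod]
      exact ih (j + 1) hlt (by omega) q' hq'
    · have hjL : j + 1 = P.length := by omega
      have hmod : PySem.Int.mod ((j : Int) + 1) (PySem.List.len P) = 0 := by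
        rw [PySem.List.len_eq, ← hjL, PySem.Int.mod_eq_emod_of_pos (by omega)]
        push_cast
        exact Int.emod_self
      rw [hmod, hjL, pvS_length]
      congr 1
      ring

-- final cycle: the loop from position j returns what B's linear scan from j returns
lemma pvLoopA_scan (P : List Int) (s q r : Int) (hP : ∀ x ∈ P, 2 ≤ x)
    (hs : s = q * P.sum + r) (_hr : 0 ≤ r) (hrT : r < P.sum) :
    ∀ (m j : Nat), j < P.length → P.length - j ≤ m → pvS P j ≤ r →
      pvLoopA P s (q * P.sum + pvS P j) (j : Int)
        = pvFirstExceedGo r (PySem.List.enumerate ((pvPreSpec 0 P).drop j) (j : Int)) := by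
  intro m
  induction m with
  | zero => intro j hj hm; omega
  | succ m ih =>
    intro j hj hm hSj
    have hget : PySem.List.pyGet? P (j : Int) = some P[j] := by
      rw [PySem.List.pyGet?_natCast]; exact List.getElem?_eq_getElem hj
    have hv2 : 2 ≤ P[j] := hP _ (List.getElem_mem hj)
    have hsum' : q * P.sum + pvS P j + P[j] = q * P.sum + pvS P (j + 1) := by
      rw [pvS_succ P j hj]; ring
    have hjpre : j < (pvPreSpec 0 P).length := by rw [pvPreSpec_length]; exact hj
    have hdrop : (pvPreSpec 0 P).drop j = pvS P (j + 1) :: (pvPreSpec 0 P).drop (j + 1) := by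
      rw [List.drop_eq_getElem_cons hjpre, pvPreSpec_getElem P 0 j hj, zero_add]
    rw [pvLoopA, hget]
    simp only [hsum']
    rw [hdrop, PySem.List.enumerate_cons]
    simp only [pvFirstExceedGo]
    rcases lt_or_ge r (pvS P (j + 1)) with hc | hc
    · rw [if_pos (by omega), if_pos hc]
    · rw [if_neg (by omega), if_neg (by omega), dif_pos (by omega)]
      have hlt : j + 1 < P.length := by
        rcases Nat.lt_or_ge (j + 1) P.length with h | h
        · exact h
        · exfalso
          have : j + 1 = P.length := by omega
          rw [this, pvS_length] at hc
          omega
      have hmod : PySem.Int.mod ((j : Int) + 1) (PySem.List.len P) = ((j + 1 : Nat) : Int) := by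
        rw [PySem.List.len_eq, PySem.Int.mod_eq_emod_of_pos (by exact_mod_cast Nat.pos_of_ne_zero (by omega))]
        rw [Int.emod_eq_of_lt (by omega) (by exact_mod_cast hlt)]
        push_cast; ring
      rw [hmod]
      rw [ih (j + 1) hlt (by omega) hc]
      norm_cast

-- ramp iterated from the start
lemma pvLoopA_ramp (P : List Int) (s q r : Int) (hP : ∀ x ∈ P, 2 ≤ x) (hL : 0 < P.length)
    (hs : s = q * P.sum + r) (hr : 0 ≤ r) :
    ∀ (qn : Nat), (qn : Int) ≤ q → pvLoopA P s 0 0 = pvLoopA P s ((qn : Int) * P.sum) 0 := by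
  intro qn
  induction qn with
  | zero => intro _; norm_num
  | succ qn ih =>
    intro hq
    have hq' : (qn : Int) + 1 ≤ q := by push_cast at hq ⊢; omega
    rw [ih (by omega)]
    have := pvLoopA_cycle P s q r hP hs hr P.length 0 hL (by omega) (qn : Int) hq'
    simp only [pvS, List.take_zero, List.sum_nil, add_zero, Nat.cast_zero] at this
    rw [this]
    norm_cast

-- ===== VERDICT (by name: the statement is the Claim_ definition above) =====
lemma pvMain (n s : Int) : find_index_sum n s = find_index_sum_alt n s := by
  set P : List Int := 2 :: (PySem.List.pyRange 3 (n + 1) 1).filter (fun i => pvIsPrimeB i 2) with hPdef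
  have hP : ∀ x ∈ P, 2 ≤ x := by
    intro x hx
    rw [hPdef, List.mem_cons] at hx
    rcases hx with rfl | hx
    · omega
    · have := (PySem.List.mem_pyRange_one.mp (List.mem_of_mem_filter hx)).1
      omega
  have hL : 0 < P.length := by rw [hPdef]; simp
  have hA : find_index_sum n s = pvLoopA P s 0 0 := by
    rw [find_index_sum, pvPrimes_eq]
  have hB : find_index_sum_alt n s
      = if s < 0 then 0 else pvFirstExceed (pvPreSpec 0 P) (PySem.Int.mod s P.sum) := by
    rw [find_index_sum_alt]
    simp only [← hPdef, pvPreFold, zero_add, List.nil_append]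
  rcases lt_or_ge s 0 with hs0 | hs0
  · rw [hA, hB, if_pos hs0, pvLoopA]
    have : PySem.List.pyGet? P (0 : Int) = some 2 := by
      rw [hPdef]; exact PySem.List.pyGet?_zero_cons 2 _
    rw [this]
    simp
    exact fun h => absurd h (by omega)
  · have hT2 : 2 ≤ P.sum := by
      have h2 : 0 ≤ ((PySem.List.pyRange 3 (n + 1) 1).filter (fun i => pvIsPrimeB i 2)).sum := by
        apply List.sum_nonneg
        intro x hx
        have := (PySem.List.mem_pyRange_one.mp (List.mem_of_mem_filter hx)).1
        omega
      rw [hPdef]; simp only [List.sum_cons]; omega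
    have hTpos : (0 : Int) < P.sum := by omega
    set q : Int := s / P.sum with hqdef
    set r : Int := s % P.sum with hrdef
    have hs : s = q * P.sum + r := by
      rw [hqdef, hrdef]
      have h1 := Int.emod_add_mul_ediv s P.sum
      linarith [mul_comm P.sum (s / P.sum)]
    have hr : 0 ≤ r := Int.emod_nonneg s (by omega)
    have hrT : r < P.sum := Int.emod_lt_of_pos s hTpos
    have hq : 0 ≤ q := Int.ediv_nonneg hs0 (by omega)
    have hramp := pvLoopA_ramp P s q r hP hL hs hr q.toNat
      (by rw [Int.toNat_of_nonneg hq])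
    rw [Int.toNat_of_nonneg hq] at hramp
    have hscan := pvLoopA_scan P s q r hP hs hr hrT P.length 0 hL (by omega)
      (by simp [pvS]; exact hr)
    simp only [Nat.cast_zero, pvS, List.take_zero, List.sum_nil, add_zero, List.drop_zero] at hscan
    rw [hA, hB, if_neg (by omega), hramp, hscan]
    rw [pvFirstExceed]
    congr 1
    rw [PySem.Int.mod_eq_emod_of_pos hTpos]

-- ===== VERDICT (by name: the statement is the Claim_ definition above) =====
theorem find_index_sum_spec : Claim_equal_find_index_sum := by
  intro n s _
  unfold Spec_find_index_sum
  exact pvMain n s
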